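-- pv_equiv track=rewrite | github.com/naveenr414/rideshare_pricing | lp_solver.py | find_opt_dp
-- ===== SOURCE A (Python) =====
-- def find_opt_dp(network_coefficients):
--     def find_sum(agent_num,l,network_coefficients):
--         sum_paths = [0 for i in range(len(l))]
--         for j in range(len(l)-2,agent_num-1,-1):
--             if l[j] == "max" and j!=agent_num:
--                 sum_paths[j] = 0
--             else:
--                 for k in range(j+1,len(l)):
--                     if l[k]!='min':
--                         sum_paths[j]+=network_coefficients[k][j]*(1+sum_paths[k])
--                     else:
--                         sum_paths[j]+=network_coefficients[k][j]*(sum_paths[k])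
--         return sum_paths[agent_num]
--     l = ["max" for i in range(len(network_coefficients))]
--     for i in range(len(network_coefficients)-1,-1,-1):
--         c = find_sum(i,l,network_coefficients)
--         if c>=1:
--             l[i] = "min"
--     return l
-- ===== SOURCE B (Python) =====
-- def find_opt_dp(network_coefficients):
--     n = len(network_coefficients)
--     l = ["max"] * n
--     sp = [0] * n  # sp[k] = suffix-sum value of agent k (0 for "max" agents)
--     for i in range(n - 1, -1, -1):
--         c = 0
--         for k in range(i + 1, n):
--             if l[k] == "min":
--                 c += network_coefficients[k][i] * sp[k]
--             else:
--                 c += network_coefficients[k][i] * (1 + sp[k])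
--         if c >= 1:
--             l[i] = "min"
--             sp[i] = c
--     return l
-- ===== Notes on version B (the rewrite author's own statement) =====
-- stated objective: faster
-- what changed: B replaces A's per-agent recomputation of the full backward DP (find_sum rebuilt from scratch for every agent, O(n^2) each) by a single backward pass that maintains the suffix DP values incrementally in one array
import Mathlib
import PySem

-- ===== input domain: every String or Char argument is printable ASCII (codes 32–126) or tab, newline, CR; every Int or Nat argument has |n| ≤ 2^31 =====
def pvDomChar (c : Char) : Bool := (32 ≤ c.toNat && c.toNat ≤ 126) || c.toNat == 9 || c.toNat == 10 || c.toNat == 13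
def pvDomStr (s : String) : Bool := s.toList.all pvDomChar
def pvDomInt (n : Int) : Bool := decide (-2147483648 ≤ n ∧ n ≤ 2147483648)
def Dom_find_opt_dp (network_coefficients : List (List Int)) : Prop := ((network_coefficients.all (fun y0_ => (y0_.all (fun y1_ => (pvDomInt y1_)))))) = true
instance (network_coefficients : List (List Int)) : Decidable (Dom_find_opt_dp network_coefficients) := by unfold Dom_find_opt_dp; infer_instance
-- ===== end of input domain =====

-- B replaces A's per-agent full backward DP (find_sum recomputed for every agent, O(n^3))
-- by one backward pass that maintains the suffix values incrementally (O(n^2)); objective: faster.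

-- ===== PORT A =====
-- inner helper find_sum of A, transliterated
def pvFindSum (agent_num : Int) (l : List String) (network_coefficients : List (List Int)) : Int :=
  let sum_paths : List Int := (List.range l.length).map (fun _ => 0)
  let sum_paths := (PySem.List.pyRange ((PySem.List.len l) - 2) (agent_num - 1) (-1)).foldl
    (fun sum_paths j =>
      if PySem.List.pyGetD l j "" = "max" ∧ j ≠ agent_num then
        PySem.List.pySetD sum_paths j 0
      else
        (PySem.List.pyRange (j + 1) (PySem.List.len l) 1).foldl
          (fun sum_paths k =>
            if PySem.List.pyGetD l k "" ≠ "min" then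
              PySem.List.pySetD sum_paths j (PySem.List.pyGetD sum_paths j 0 +
                PySem.List.pyGetD (PySem.List.pyGetD network_coefficients k []) j 0 *
                  (1 + PySem.List.pyGetD sum_paths k 0))
            else
              PySem.List.pySetD sum_paths j (PySem.List.pyGetD sum_paths j 0 +
                PySem.List.pyGetD (PySem.List.pyGetD network_coefficients k []) j 0 *
                  (PySem.List.pyGetD sum_paths k 0)))
          sum_paths)
    sum_paths
  PySem.List.pyGetD sum_paths agent_num 0

def find_opt_dp (network_coefficients : List (List Int)) : List String :=
  let l : List String := (List.range network_coefficients.length).map (fun _ => "max")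
  (PySem.List.pyRange ((PySem.List.len network_coefficients) - 1) (-1) (-1)).foldl
    (fun l i =>
      let c := pvFindSum i l network_coefficients
      if c ≥ 1 then PySem.List.pySetD l i "min" else l)
    l

-- ===== PORT B =====
def find_opt_dp_alt (network_coefficients : List (List Int)) : List String :=
  let n := network_coefficients.length
  let res := (PySem.List.pyRange ((n : Int) - 1) (-1) (-1)).foldl
    (fun (st : List String × List Int) i =>
      let c := (PySem.List.pyRange (i + 1) (n : Int) 1).foldl
        (fun c k =>
          if PySem.List.pyGetD st.1 k "" = "min" then
            c + PySem.List.pyGetD (PySem.List.pyGetD network_coefficients k []) i 0 *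
                  PySem.List.pyGetD st.2 k 0
          else
            c + PySem.List.pyGetD (PySem.List.pyGetD network_coefficients k []) i 0 *
                  (1 + PySem.List.pyGetD st.2 k 0))
        0
      if c ≥ 1 then (PySem.List.pySetD st.1 i "min", PySem.List.pySetD st.2 i c) else st)
    (List.replicate n "max", List.replicate n 0)
  res.1

-- ===== PRECONDITION & SPEC =====
-- Pre_ excludes exactly the inputs on which Python A raises IndexError: row k shorter than k
-- (A reads network_coefficients[k][j] for every j < k).
def Pre_find_opt_dp (network_coefficients : List (List Int)) : Prop :=
  ∀ k, k < network_coefficients.length → k ≤ (network_coefficients.getD k []).length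
instance (network_coefficients : List (List Int)) : Decidable (Pre_find_opt_dp network_coefficients) := by
  unfold Pre_find_opt_dp; infer_instance
def pvWitness_find_opt_dp : List (List Int) := [[0, 0], [2, 0]]
def Spec_find_opt_dp (network_coefficients : List (List Int)) (out : List String) : Prop := out = find_opt_dp_alt network_coefficients
instance (network_coefficients : List (List Int)) (out : List String) : Decidable (Spec_find_opt_dp network_coefficients out) := by unfold Spec_find_opt_dp; infer_instance

-- ===== CLAIM (what is proved, stated in full; the proofs are below) =====
def Claim_equal_find_opt_dp : Prop := ∀ (network_coefficients : List (List Int)), Dom_find_opt_dp network_coefficients → Pre_find_opt_dp network_coefficients → Spec_find_opt_dp network_coefficients (find_opt_dp network_coefficients)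

-- ===== LEMMAS AND PROOFS =====

def pvG (nc : List (List Int)) (k j : Nat) : Int := (nc.getD k []).getD j 0
def pvC (nc : List (List Int)) (j : Nat) : Int :=
  ((List.range (nc.length - (j + 1))).attach.map (fun t =>
    pvG nc (j + 1 + t.1) j *
      (if 1 ≤ pvC nc (j + 1 + t.1) then pvC nc (j + 1 + t.1) else 1))).sum
termination_by nc.length - j
decreasing_by have := List.mem_range.mp t.2; omega
def pvLab (nc : List (List Int)) (i : Nat) : List String :=
  (List.range nc.length).map (fun m => if i ≤ m ∧ 1 ≤ pvC nc m then "min" else "max")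
def pvSp (nc : List (List Int)) (i : Nat) : List Int :=
  (List.range nc.length).map (fun m => if i ≤ m ∧ 1 ≤ pvC nc m then pvC nc m else 0)
def pvT (nc : List (List Int)) (j : Nat) : List Int :=
  (List.range nc.length).map (fun m => if j < m ∧ 1 ≤ pvC nc m then pvC nc m else 0)
def pvF (nc : List (List Int)) (i : Nat) : List Int :=
  (List.range nc.length).map (fun m =>
    if m = i then pvC nc i else if i < m ∧ 1 ≤ pvC nc m then pvC nc m else 0)
lemma pvC_eq (nc : List (List Int)) (j : Nat) :
    pvC nc j = ((List.range (nc.length - (j + 1))).map (fun t =>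
      pvG nc (j + 1 + t) j *
        (if 1 ≤ pvC nc (j + 1 + t) then pvC nc (j + 1 + t) else 1))).sum := by
  rw [pvC]
  conv_rhs => rw [← List.attach_map_subtype_val (List.range (nc.length - (j + 1))), List.map_map]
  rfl
lemma getD_map_range {α : Type} (f : Nat → α) {n m : Nat} (h : m < n) (d : α) :
    ((List.range n).map f).getD m d = f m := by
  simp [List.getD, h]
lemma set_map_range {α : Type} (f : Nat → α) (n j : Nat) (v : α) :
    ((List.range n).map f).set j v = (List.range n).map (fun m => if m = j then v else f m) := by
  apply List.ext_getElem
  · simp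
  · intro m h1 h2
    simp only [List.getElem_set, List.getElem_map, List.getElem_range]
    by_cases h : m = j
    · simp [h]
    · simp [h, Ne.symm h]
lemma pvInner (G : Int → Int → Int) (j : Nat) :
    ∀ (ks : List Int) (sp : List Int) (acc : Int), j < sp.length →
    (∀ k ∈ ks, (j : Int) < k ∧ k < (sp.length : Int)) →
    ks.foldl (fun s k => PySem.List.pySetD s (j : Int)
        (PySem.List.pyGetD s (j : Int) 0 + G k (PySem.List.pyGetD s k 0)))
      (PySem.List.pySetD sp (j : Int) acc)
    = PySem.List.pySetD sp (j : Int)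
        (acc + (ks.map (fun k => G k (PySem.List.pyGetD sp k 0))).sum) := by
  intro ks
  induction ks with
  | nil => intro sp acc h1 h2; simp
  | cons k ks ih =>
    intro sp acc h1 h2
    obtain ⟨hk1, hk2⟩ := h2 k (by simp)
    obtain ⟨kn, rfl⟩ : ∃ kn : Nat, k = (kn : Int) := ⟨k.toNat, (Int.toNat_of_nonneg (by omega)).symm⟩
    have hkj : kn ≠ j := by omega
    simp only [List.foldl_cons]
    have e1 : PySem.List.pyGetD (PySem.List.pySetD sp (j : Int) acc) (j : Int) 0 = acc := by
      simp [PySem.List.pyGetD_natCast, PySem.List.pySetD_natCast, List.getD, h1]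
    have e2 : PySem.List.pyGetD (PySem.List.pySetD sp (j : Int) acc) (kn : Int) 0
        = PySem.List.pyGetD sp (kn : Int) 0 := by
      simp [PySem.List.pyGetD_natCast, PySem.List.pySetD_natCast, List.getD,
        List.getElem?_set_ne (Ne.symm hkj)]
    have e3 : PySem.List.pySetD (PySem.List.pySetD sp (j : Int) acc) (j : Int)
        (acc + G (kn : Int) (PySem.List.pyGetD sp (kn : Int) 0))
        = PySem.List.pySetD sp (j : Int) (acc + G (kn : Int) (PySem.List.pyGetD sp (kn : Int) 0)) := by
      simp [PySem.List.pySetD_natCast, List.set_set]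
    rw [e1, e2, e3, ih sp _ h1 (fun k hk => h2 k (by simp [hk]))]
    simp [add_assoc]
lemma pvSum_generic (nc : List (List Int)) (j' : Nat) (termf : Int → Int)
    (h : ∀ t : Nat, t < nc.length - (j' + 1) →
      termf (((j' + 1 + t : Nat) : Int)) =
        pvG nc (j' + 1 + t) j' * (if 1 ≤ pvC nc (j' + 1 + t) then pvC nc (j' + 1 + t) else 1)) :
    ((PySem.List.pyRange ((j' : Int) + 1) (nc.length : Int) 1).map termf).sum = pvC nc j' := by
  rw [PySem.List.pyRange_one, List.map_map, pvC_eq]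
  have hN : ((nc.length : Int) - ((j' : Int) + 1)).toNat = nc.length - (j' + 1) := by omega
  rw [hN]
  apply congrArg
  apply List.map_congr_left
  intro t ht
  have ht' := List.mem_range.mp ht
  have : ((j' : Int) + 1 + (t : Int)) = ((j' + 1 + t : Nat) : Int) := by push_cast; ring
  simp only [Function.comp_apply, this, h t ht']
lemma pvLab_getD (nc : List (List Int)) (i m : Nat) (h : m < nc.length) :
    PySem.List.pyGetD (pvLab nc i) (m : Int) "" = if i ≤ m ∧ 1 ≤ pvC nc m then "min" else "max" := by
  simp only [pvLab, PySem.List.pyGetD_natCast]; rw [getD_map_range _ h]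
lemma pvSp_getD (nc : List (List Int)) (i m : Nat) (h : m < nc.length) :
    PySem.List.pyGetD (pvSp nc i) (m : Int) 0 = if i ≤ m ∧ 1 ≤ pvC nc m then pvC nc m else 0 := by
  simp only [pvSp, PySem.List.pyGetD_natCast]; rw [getD_map_range _ h]
lemma pvT_getD (nc : List (List Int)) (j m : Nat) (h : m < nc.length) :
    PySem.List.pyGetD (pvT nc j) (m : Int) 0 = if j < m ∧ 1 ≤ pvC nc m then pvC nc m else 0 := by
  simp only [pvT, PySem.List.pyGetD_natCast]; rw [getD_map_range _ h]
lemma pvT_length (nc : List (List Int)) (j : Nat) : (pvT nc j).length = nc.length := by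
  simp [pvT]
lemma pvAelse (nc : List (List Int)) (i j' : Nat) (hij : i ≤ j') (hj' : j' < nc.length) :
    (PySem.List.pyRange ((j' : Int) + 1) ((nc.length : Int)) 1).foldl
      (fun sum_paths k =>
        if PySem.List.pyGetD (pvLab nc (i + 1)) k "" ≠ "min" then
          PySem.List.pySetD sum_paths ((j' : Nat) : Int) (PySem.List.pyGetD sum_paths ((j' : Nat) : Int) 0 +
            PySem.List.pyGetD (PySem.List.pyGetD nc k []) ((j' : Nat) : Int) 0 *
              (1 + PySem.List.pyGetD sum_paths k 0))
        else
          PySem.List.pySetD sum_paths ((j' : Nat) : Int) (PySem.List.pyGetD sum_paths ((j' : Nat) : Int) 0 +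
            PySem.List.pyGetD (PySem.List.pyGetD nc k []) ((j' : Nat) : Int) 0 *
              (PySem.List.pyGetD sum_paths k 0)))
      (pvT nc j')
    = PySem.List.pySetD (pvT nc j') ((j' : Nat) : Int) (pvC nc j') := by
  have hbody : (fun (sum_paths : List Int) (k : Int) =>
        if PySem.List.pyGetD (pvLab nc (i + 1)) k "" ≠ "min" then
          PySem.List.pySetD sum_paths ((j' : Nat) : Int) (PySem.List.pyGetD sum_paths ((j' : Nat) : Int) 0 +
            PySem.List.pyGetD (PySem.List.pyGetD nc k []) ((j' : Nat) : Int) 0 *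
              (1 + PySem.List.pyGetD sum_paths k 0))
        else
          PySem.List.pySetD sum_paths ((j' : Nat) : Int) (PySem.List.pyGetD sum_paths ((j' : Nat) : Int) 0 +
            PySem.List.pyGetD (PySem.List.pyGetD nc k []) ((j' : Nat) : Int) 0 *
              (PySem.List.pyGetD sum_paths k 0)))
      = (fun (s : List Int) (k : Int) => PySem.List.pySetD s ((j' : Nat) : Int)
          (PySem.List.pyGetD s ((j' : Nat) : Int) 0 +
            (fun (k : Int) (v : Int) =>
              if PySem.List.pyGetD (pvLab nc (i + 1)) k "" ≠ "min" then
                PySem.List.pyGetD (PySem.List.pyGetD nc k []) ((j' : Nat) : Int) 0 * (1 + v)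
              else
                PySem.List.pyGetD (PySem.List.pyGetD nc k []) ((j' : Nat) : Int) 0 * v)
              k (PySem.List.pyGetD s k 0))) := by
    funext s k
    by_cases h : PySem.List.pyGetD (pvLab nc (i + 1)) k "" ≠ "min" <;> simp [h]
  rw [hbody]
  have hstart : pvT nc j' = PySem.List.pySetD (pvT nc j') ((j' : Nat) : Int) 0 := by
    simp only [pvT, PySem.List.pySetD_natCast, set_map_range]
    apply List.map_congr_left
    intro m hm
    by_cases h : m = j' <;> simp [h]
  conv_lhs => rw [hstart]
  rw [pvInner (fun (k : Int) (v : Int) =>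
        if PySem.List.pyGetD (pvLab nc (i + 1)) k "" ≠ "min" then
          PySem.List.pyGetD (PySem.List.pyGetD nc k []) ((j' : Nat) : Int) 0 * (1 + v)
        else
          PySem.List.pyGetD (PySem.List.pyGetD nc k []) ((j' : Nat) : Int) 0 * v)
      j' _ _ 0 (by rw [pvT_length]; exact hj')
      (by intro k hk; rw [pvT_length]; exact ⟨(PySem.List.mem_pyRange_one.mp hk).1.trans_lt' (by omega), (PySem.List.mem_pyRange_one.mp hk).2⟩)]
  rw [pvSum_generic nc j' _ ?_]
  · rw [zero_add]
  · intro t ht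
    have hk : j' + 1 + t < nc.length := by omega
    have hg : PySem.List.pyGetD (PySem.List.pyGetD nc ((j' + 1 + t : Nat) : Int) []) ((j' : Nat) : Int) 0
        = pvG nc (j' + 1 + t) j' := by
      simp only [PySem.List.pyGetD_natCast]; rfl
    simp only [pvT_getD nc j' _ hk, pvLab_getD nc _ _ hk, hg]
    have c1 : j' < j' + 1 + t := by omega
    have c2 : i + 1 ≤ j' + 1 + t := by omega
    by_cases h : 1 ≤ pvC nc (j' + 1 + t)
    · simp [h, c1, c2]
    · simp [h, c1, c2]
lemma pvSetT (nc : List (List Int)) (j' : Nat) (hj1 : 1 ≤ j') (hj' : j' < nc.length) (v : Int)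
    (hv : v = if 1 ≤ pvC nc j' then pvC nc j' else 0) :
    PySem.List.pySetD (pvT nc j') ((j' : Nat) : Int) v = pvT nc (j' - 1) := by
  simp only [pvT, PySem.List.pySetD_natCast, set_map_range]
  apply List.map_congr_left
  intro m hm
  by_cases h : m = j'
  · subst h; rw [if_pos rfl, hv]
    by_cases h2 : 1 ≤ pvC nc m
    · rw [if_pos h2, if_pos ⟨by omega, h2⟩]
    · rw [if_neg h2, if_neg (by rintro ⟨a, b⟩; first | omega | exact h3 b | exact h2 b | exact h b)]
  · rw [if_neg h]
    have hiff : (j' < m ∧ 1 ≤ pvC nc m) ↔ (j' - 1 < m ∧ 1 ≤ pvC nc m) := by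
      constructor
      · rintro ⟨a, b⟩; exact ⟨by omega, b⟩
      · rintro ⟨a, b⟩; exact ⟨by omega, b⟩
    rw [if_congr hiff rfl rfl]

lemma pvAloop (nc : List (List Int)) (i : Nat) :
    ∀ (k j' : Nat), j' = i + k → j' < nc.length →
    (PySem.List.pyRange ((j' : Nat) : Int) ((i : Int) - 1) (-1)).foldl
      (fun sum_paths j =>
        if PySem.List.pyGetD (pvLab nc (i + 1)) j "" = "max" ∧ j ≠ ((i : Nat) : Int) then
          PySem.List.pySetD sum_paths j 0
        else
          (PySem.List.pyRange (j + 1) ((nc.length : Int)) 1).foldl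
            (fun sum_paths k =>
              if PySem.List.pyGetD (pvLab nc (i + 1)) k "" ≠ "min" then
                PySem.List.pySetD sum_paths j (PySem.List.pyGetD sum_paths j 0 +
                  PySem.List.pyGetD (PySem.List.pyGetD nc k []) j 0 *
                    (1 + PySem.List.pyGetD sum_paths k 0))
              else
                PySem.List.pySetD sum_paths j (PySem.List.pyGetD sum_paths j 0 +
                  PySem.List.pyGetD (PySem.List.pyGetD nc k []) j 0 *
                    (PySem.List.pyGetD sum_paths k 0)))
            sum_paths)
      (pvT nc j')
    = pvF nc i := by
  intro k
  induction k with
  | zero =>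
    intro j' hj hj'
    have hji : i = j' := by omega
    subst hji
    rw [PySem.List.pyRange_neg_one_cons (by omega),
        PySem.List.pyRange_neg_one_eq_nil (by omega), List.foldl_cons, List.foldl_nil]
    rw [if_neg (by simp)]
    rw [pvAelse nc i i (le_refl i) hj']
    rw [pvT, pvF, PySem.List.pySetD_natCast, set_map_range]
  | succ k ih =>
    intro j' hj hj'
    have hji : i < j' := by omega
    rw [PySem.List.pyRange_neg_one_cons (by omega), List.foldl_cons]
    have hcast : ((j' : Nat) : Int) - 1 = ((i + k : Nat) : Int) := by omega
    have hlab : PySem.List.pyGetD (pvLab nc (i + 1)) ((j' : Nat) : Int) ""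
        = if 1 ≤ pvC nc j' then "min" else "max" := by
      rw [pvLab_getD nc _ _ hj']
      by_cases h2 : 1 ≤ pvC nc j'
      · rw [if_pos ⟨by omega, h2⟩, if_pos h2]
      · rw [if_neg (by rintro ⟨a, b⟩; first | omega | exact h3 b | exact h2 b | exact h b), if_neg h2]
    have hne : ((j' : Nat) : Int) ≠ ((i : Nat) : Int) := by
      intro hc
      exact absurd (by exact_mod_cast hc : j' = i) (by omega)
    by_cases h : 1 ≤ pvC nc j'
    · rw [if_neg (by simp [hlab, h])]
      rw [pvAelse nc i j' (by omega) hj']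
      rw [pvSetT nc j' (by omega) hj' _ (by simp [h])]
      have he : j' - 1 = i + k := by omega
      rw [he, hcast]
      exact ih (i + k) rfl (by omega)
    · rw [if_pos ⟨by simp [hlab, h], hne⟩]
      have h0 : PySem.List.pySetD (pvT nc j') ((j' : Nat) : Int) 0 = pvT nc (j' - 1) :=
        pvSetT nc j' (by omega) hj' 0 (by simp [h])
      rw [h0]
      have he : j' - 1 = i + k := by omega
      rw [he, hcast]
      exact ih (i + k) rfl (by omega)
lemma pvC_last (nc : List (List Int)) (j : Nat) (h : nc.length ≤ j + 1) : pvC nc j = 0 := by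
  rw [pvC_eq, Nat.sub_eq_zero_of_le h]
  simp

lemma pvZeroT (nc : List (List Int)) (j : Nat) (h : nc.length ≤ j + 2) :
    (List.range nc.length).map (fun _ => (0 : Int)) = pvT nc j := by
  apply List.map_congr_left
  intro m hm
  have hm' := List.mem_range.mp hm
  by_cases h2 : j < m
  · rw [pvC_last nc m (by omega)]
    simp
  · simp [h2]

lemma pvFindSum_eq (nc : List (List Int)) (i : Nat) (hi : i < nc.length) :
    pvFindSum ((i : Nat) : Int) (pvLab nc (i + 1)) nc = pvC nc i := by
  have hlen : (pvLab nc (i + 1)).length = nc.length := by simp [pvLab]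
  simp only [pvFindSum, PySem.List.len_eq, hlen]
  by_cases hcase : i + 1 < nc.length
  · have h2 : (nc.length : Int) - 2 = ((nc.length - 2 : Nat) : Int) := by omega
    rw [h2, pvZeroT nc (nc.length - 2) (by omega)]
    rw [pvAloop nc i (nc.length - 2 - i) (nc.length - 2) (by omega) (by omega)]
    simp only [pvF, PySem.List.pyGetD_natCast]
    rw [getD_map_range _ hi]
    simp
  · have hn : nc.length = i + 1 := by omega
    rw [PySem.List.pyRange_neg_one_eq_nil (by omega), List.foldl_nil]
    simp only [PySem.List.pyGetD_natCast]
    rw [getD_map_range _ hi, pvC_last nc i (by omega)]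
lemma pvSetLab (nc : List (List Int)) (i : Nat) (h : 1 ≤ pvC nc i) :
    PySem.List.pySetD (pvLab nc (i + 1)) ((i : Nat) : Int) "min" = pvLab nc i := by
  simp only [pvLab, PySem.List.pySetD_natCast, set_map_range]
  apply List.map_congr_left
  intro m hm
  by_cases h2 : m = i
  · subst h2; rw [if_pos rfl, if_pos ⟨le_refl m, h⟩]
  · rw [if_neg h2]
    by_cases h3 : 1 ≤ pvC nc m
    · by_cases h4 : i ≤ m
      · rw [if_pos ⟨by omega, h3⟩, if_pos ⟨h4, h3⟩]
      · rw [if_neg (by rintro ⟨a, b⟩; first | omega | exact h3 b | exact h2 b | exact h b), if_neg (by rintro ⟨a, b⟩; first | omega | exact h3 b | exact h2 b | exact h b)]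
    · rw [if_neg (by rintro ⟨a, b⟩; first | omega | exact h3 b | exact h2 b | exact h b), if_neg (by rintro ⟨a, b⟩; first | omega | exact h3 b | exact h2 b | exact h b)]
lemma pvSetSp (nc : List (List Int)) (i : Nat) (h : 1 ≤ pvC nc i) :
    PySem.List.pySetD (pvSp nc (i + 1)) ((i : Nat) : Int) (pvC nc i) = pvSp nc i := by
  simp only [pvSp, PySem.List.pySetD_natCast, set_map_range]
  apply List.map_congr_left
  intro m hm
  by_cases h2 : m = i
  · subst h2; rw [if_pos rfl, if_pos ⟨le_refl m, h⟩]
  · rw [if_neg h2]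
    by_cases h3 : 1 ≤ pvC nc m
    · by_cases h4 : i ≤ m
      · rw [if_pos ⟨by omega, h3⟩, if_pos ⟨h4, h3⟩]
      · rw [if_neg (by rintro ⟨a, b⟩; first | omega | exact h3 b | exact h2 b | exact h b), if_neg (by rintro ⟨a, b⟩; first | omega | exact h3 b | exact h2 b | exact h b)]
    · rw [if_neg (by rintro ⟨a, b⟩; first | omega | exact h3 b | exact h2 b | exact h b), if_neg (by rintro ⟨a, b⟩; first | omega | exact h3 b | exact h2 b | exact h b)]
lemma pvLabStep (nc : List (List Int)) (i : Nat) (h : ¬ 1 ≤ pvC nc i) :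
    pvLab nc (i + 1) = pvLab nc i := by
  apply List.map_congr_left
  intro m hm
  by_cases h2 : m = i
  · subst h2; rw [if_neg (by rintro ⟨a, b⟩; first | omega | exact h3 b | exact h2 b | exact h b), if_neg (by rintro ⟨a, b⟩; first | omega | exact h3 b | exact h2 b | exact h b)]
  · by_cases h3 : 1 ≤ pvC nc m
    · by_cases h4 : i ≤ m
      · rw [if_pos ⟨by omega, h3⟩, if_pos ⟨h4, h3⟩]
      · rw [if_neg (by rintro ⟨a, b⟩; first | omega | exact h3 b | exact h2 b | exact h b), if_neg (by rintro ⟨a, b⟩; first | omega | exact h3 b | exact h2 b | exact h b)]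
    · rw [if_neg (by rintro ⟨a, b⟩; first | omega | exact h3 b | exact h2 b | exact h b), if_neg (by rintro ⟨a, b⟩; first | omega | exact h3 b | exact h2 b | exact h b)]
lemma pvSpStep (nc : List (List Int)) (i : Nat) (h : ¬ 1 ≤ pvC nc i) :
    pvSp nc (i + 1) = pvSp nc i := by
  apply List.map_congr_left
  intro m hm
  by_cases h2 : m = i
  · subst h2; rw [if_neg (by rintro ⟨a, b⟩; first | omega | exact h3 b | exact h2 b | exact h b), if_neg (by rintro ⟨a, b⟩; first | omega | exact h3 b | exact h2 b | exact h b)]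
  · by_cases h3 : 1 ≤ pvC nc m
    · by_cases h4 : i ≤ m
      · rw [if_pos ⟨by omega, h3⟩, if_pos ⟨h4, h3⟩]
      · rw [if_neg (by rintro ⟨a, b⟩; first | omega | exact h3 b | exact h2 b | exact h b), if_neg (by rintro ⟨a, b⟩; first | omega | exact h3 b | exact h2 b | exact h b)]
    · rw [if_neg (by rintro ⟨a, b⟩; first | omega | exact h3 b | exact h2 b | exact h b), if_neg (by rintro ⟨a, b⟩; first | omega | exact h3 b | exact h2 b | exact h b)]

lemma pvAouter (nc : List (List Int)) :
    ∀ i : Nat, i ≤ nc.length →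
    (PySem.List.pyRange (((i : Nat) : Int) - 1) (-1) (-1)).foldl
      (fun l i =>
        let c := pvFindSum i l nc
        if c ≥ 1 then PySem.List.pySetD l i "min" else l)
      (pvLab nc i)
    = pvLab nc 0 := by
  intro i
  induction i with
  | zero =>
    intro _
    rw [PySem.List.pyRange_neg_one_eq_nil (by norm_num), List.foldl_nil]
  | succ i ih =>
    intro hi
    have hc : (((i + 1 : Nat) : Int)) - 1 = ((i : Nat) : Int) := by push_cast; ring
    rw [hc, PySem.List.pyRange_neg_one_cons (by omega), List.foldl_cons]
    simp only [pvFindSum_eq nc i (by omega)]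
    by_cases h : 1 ≤ pvC nc i
    · rw [if_pos h, pvSetLab nc i h]
      exact ih (by omega)
    · rw [if_neg h, pvLabStep nc i h]
      exact ih (by omega)
lemma pvBsum (nc : List (List Int)) (i : Nat) (hi : i < nc.length) :
    (PySem.List.pyRange (((i : Nat) : Int) + 1) ((nc.length : Int)) 1).foldl
      (fun c k =>
        if PySem.List.pyGetD (pvLab nc (i + 1)) k "" = "min" then
          c + PySem.List.pyGetD (PySem.List.pyGetD nc k []) ((i : Nat) : Int) 0 *
                PySem.List.pyGetD (pvSp nc (i + 1)) k 0
        else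
          c + PySem.List.pyGetD (PySem.List.pyGetD nc k []) ((i : Nat) : Int) 0 *
                (1 + PySem.List.pyGetD (pvSp nc (i + 1)) k 0))
      0 = pvC nc i := by
  have hbody : (fun (c : Int) (k : Int) =>
        if PySem.List.pyGetD (pvLab nc (i + 1)) k "" = "min" then
          c + PySem.List.pyGetD (PySem.List.pyGetD nc k []) ((i : Nat) : Int) 0 *
                PySem.List.pyGetD (pvSp nc (i + 1)) k 0
        else
          c + PySem.List.pyGetD (PySem.List.pyGetD nc k []) ((i : Nat) : Int) 0 *
                (1 + PySem.List.pyGetD (pvSp nc (i + 1)) k 0))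
      = (fun (c : Int) (k : Int) => c +
          (fun (k : Int) =>
            if PySem.List.pyGetD (pvLab nc (i + 1)) k "" = "min" then
              PySem.List.pyGetD (PySem.List.pyGetD nc k []) ((i : Nat) : Int) 0 *
                PySem.List.pyGetD (pvSp nc (i + 1)) k 0
            else
              PySem.List.pyGetD (PySem.List.pyGetD nc k []) ((i : Nat) : Int) 0 *
                (1 + PySem.List.pyGetD (pvSp nc (i + 1)) k 0)) k) := by
    funext c k
    by_cases h : PySem.List.pyGetD (pvLab nc (i + 1)) k "" = "min" <;> simp [h]
  rw [hbody, PySem.List.foldl_add _ (fun (k : Int) =>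
        if PySem.List.pyGetD (pvLab nc (i + 1)) k "" = "min" then
          PySem.List.pyGetD (PySem.List.pyGetD nc k []) ((i : Nat) : Int) 0 *
            PySem.List.pyGetD (pvSp nc (i + 1)) k 0
        else
          PySem.List.pyGetD (PySem.List.pyGetD nc k []) ((i : Nat) : Int) 0 *
            (1 + PySem.List.pyGetD (pvSp nc (i + 1)) k 0)) 0]
  rw [pvSum_generic nc i _ ?_]
  · rw [zero_add]
  · intro t ht
    have hk : i + 1 + t < nc.length := by omega
    have hg : PySem.List.pyGetD (PySem.List.pyGetD nc ((i + 1 + t : Nat) : Int) []) ((i : Nat) : Int) 0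
        = pvG nc (i + 1 + t) i := by
      simp only [PySem.List.pyGetD_natCast]; rfl
    have hlab : PySem.List.pyGetD (pvLab nc (i + 1)) ((i + 1 + t : Nat) : Int) ""
        = if 1 ≤ pvC nc (i + 1 + t) then "min" else "max" := by
      rw [pvLab_getD nc _ _ hk]
      by_cases h2 : 1 ≤ pvC nc (i + 1 + t)
      · rw [if_pos ⟨by omega, h2⟩, if_pos h2]
      · rw [if_neg (by rintro ⟨a, b⟩; exact h2 b), if_neg h2]
    have hsp : PySem.List.pyGetD (pvSp nc (i + 1)) ((i + 1 + t : Nat) : Int) 0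
        = if 1 ≤ pvC nc (i + 1 + t) then pvC nc (i + 1 + t) else 0 := by
      rw [pvSp_getD nc _ _ hk]
      by_cases h2 : 1 ≤ pvC nc (i + 1 + t)
      · rw [if_pos ⟨by omega, h2⟩, if_pos h2]
      · rw [if_neg (by rintro ⟨a, b⟩; exact h2 b), if_neg h2]
    simp only [hg, hlab, hsp]
    by_cases h2 : 1 ≤ pvC nc (i + 1 + t) <;> simp [h2]

lemma pvBloop (nc : List (List Int)) :
    ∀ i : Nat, i ≤ nc.length →
    (PySem.List.pyRange (((i : Nat) : Int) - 1) (-1) (-1)).foldl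
      (fun (st : List String × List Int) i =>
        let c := (PySem.List.pyRange (i + 1) ((nc.length : Int)) 1).foldl
          (fun c k =>
            if PySem.List.pyGetD st.1 k "" = "min" then
              c + PySem.List.pyGetD (PySem.List.pyGetD nc k []) i 0 *
                    PySem.List.pyGetD st.2 k 0
            else
              c + PySem.List.pyGetD (PySem.List.pyGetD nc k []) i 0 *
                    (1 + PySem.List.pyGetD st.2 k 0))
          0
        if c ≥ 1 then (PySem.List.pySetD st.1 i "min", PySem.List.pySetD st.2 i c) else st)
      (pvLab nc i, pvSp nc i)
    = (pvLab nc 0, pvSp nc 0) := by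
  intro i
  induction i with
  | zero =>
    intro _
    rw [PySem.List.pyRange_neg_one_eq_nil (by norm_num), List.foldl_nil]
  | succ i ih =>
    intro hi
    have hc : (((i + 1 : Nat) : Int)) - 1 = ((i : Nat) : Int) := by push_cast; ring
    rw [hc, PySem.List.pyRange_neg_one_cons (by omega)]
    simp only [List.foldl_cons]
    rw [pvBsum nc i (by omega)]
    by_cases h : 1 ≤ pvC nc i
    · rw [if_pos h, pvSetLab nc i h, pvSetSp nc i h]
      exact ih (by omega)
    · rw [if_neg h, pvLabStep nc i h, pvSpStep nc i h]
      exact ih (by omega)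
lemma pvLab_top (nc : List (List Int)) : pvLab nc nc.length = List.replicate nc.length "max" := by
  apply List.eq_replicate_iff.mpr
  refine ⟨by simp [pvLab], ?_⟩
  intro b hb
  obtain ⟨m, hm, rfl⟩ := List.mem_map.mp hb
  rw [if_neg (by rintro ⟨a, _⟩; exact absurd (List.mem_range.mp hm) (by omega))]
lemma pvSp_top (nc : List (List Int)) : pvSp nc nc.length = List.replicate nc.length 0 := by
  apply List.eq_replicate_iff.mpr
  refine ⟨by simp [pvSp], ?_⟩
  intro b hb
  obtain ⟨m, hm, rfl⟩ := List.mem_map.mp hb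
  rw [if_neg (by rintro ⟨a, _⟩; exact absurd (List.mem_range.mp hm) (by omega))]

theorem find_opt_dp_eq (nc : List (List Int)) : find_opt_dp nc = pvLab nc 0 := by
  simp only [find_opt_dp, PySem.List.len_eq]
  rw [show (List.range nc.length).map (fun _ => "max") = pvLab nc nc.length by
    apply List.map_congr_left
    intro m hm
    rw [if_neg (by rintro ⟨a, _⟩; exact absurd (List.mem_range.mp hm) (by omega))]]
  exact pvAouter nc nc.length le_rfl

theorem find_opt_dp_alt_eq (nc : List (List Int)) : find_opt_dp_alt nc = pvLab nc 0 := by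
  simp only [find_opt_dp_alt]
  rw [show List.replicate nc.length "max" = pvLab nc nc.length from (pvLab_top nc).symm,
      show List.replicate nc.length (0 : Int) = pvSp nc nc.length from (pvSp_top nc).symm]
  rw [pvBloop nc nc.length le_rfl]

-- ===== VERDICT (by name: the statement is the Claim_ definition above) =====
theorem find_opt_dp_spec : Claim_equal_find_opt_dp := by
  intro nc _ _
  unfold Spec_find_opt_dp
  rw [find_opt_dp_eq, find_opt_dp_alt_eq]
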